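-- pv_equiv track=rewrite | github.com/MomoSyrup/gng-activity-calendar | scripts/render-calendar-image.py | build_period_map
-- ===== SOURCE A (Python) =====
-- def key(a):
--     return "|".join(
--         [
--             a.get("name") or "",
--             a.get("startDate") or "",
--             a.get("endDate") or "",
--             a.get("source") or "",
--             a.get("category") or "",
--         ]
--     )
--
-- def build_period_map(activities):
--     by_name = {}
--     for a in activities:
--         n = a.get("name") or ""
--         if not n:
--             continue
--         by_name.setdefault(n, []).append(a)
--     out = {}
--     for _, lst in by_name.items():
--         lst = sorted(
--             lst,
--             key=lambda x: (
--                 x.get("startDate") or "9999-99-99",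
--                 x.get("endDate") or x.get("startDate") or "9999-99-99",
--             ),
--         )
--         if len(lst) <= 1:
--             continue
--         for i, a in enumerate(lst, start=1):
--             out[key(a)] = i
--     return out
-- ===== SOURCE B (Python) =====
-- def key(a):
--     return "|".join(
--         [
--             a.get("name") or "",
--             a.get("startDate") or "",
--             a.get("endDate") or "",
--             a.get("source") or "",
--             a.get("category") or "",
--         ]
--     )
--
-- def build_period_map(activities):
--     # decorate once: (name, (start-sort-key, end-sort-key), output-key) per named activity
--     rows = []
--     for a in activities:
--         n = a.get("name") or ""
--         if n:
--             rows.append(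
--                 (
--                     n,
--                     (
--                         a.get("startDate") or "9999-99-99",
--                         a.get("endDate") or a.get("startDate") or "9999-99-99",
--                     ),
--                     key(a),
--                 )
--             )
--     out = {}
--     for n in dict.fromkeys(r[0] for r in rows):
--         grp = sorted((r for r in rows if r[0] == n), key=lambda r: r[1])
--         if len(grp) > 1:
--             for i, r in enumerate(grp, 1):
--                 out[r[2]] = i
--     return out
-- ===== Notes on version B (the rewrite author's own statement) =====
-- stated objective: alternative
-- what changed: B replaces A's dict-of-lists grouping (setdefault/append then iterating dict items, recomputing sort keys and key() inside the loops) by a decorate-once pass that precomputes one (name, sort-key tuple, output-key) row per named activity, then dedups names in first-occurrence order and filters/sorts the decorated rows per name.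
import Mathlib
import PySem

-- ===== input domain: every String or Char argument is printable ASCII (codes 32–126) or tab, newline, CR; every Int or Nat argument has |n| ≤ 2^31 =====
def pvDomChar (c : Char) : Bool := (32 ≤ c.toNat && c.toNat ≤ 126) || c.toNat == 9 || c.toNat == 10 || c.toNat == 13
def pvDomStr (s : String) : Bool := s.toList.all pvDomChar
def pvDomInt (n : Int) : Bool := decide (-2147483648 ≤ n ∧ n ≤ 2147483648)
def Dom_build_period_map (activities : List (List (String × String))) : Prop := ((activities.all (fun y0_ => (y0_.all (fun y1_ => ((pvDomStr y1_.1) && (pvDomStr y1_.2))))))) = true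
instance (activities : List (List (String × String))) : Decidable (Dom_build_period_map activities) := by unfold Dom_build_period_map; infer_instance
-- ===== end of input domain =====

-- B replaces A's dict-of-lists grouping (setdefault/append, then per-name sort of raw dicts with
-- the sort keys and key() recomputed inside the loops) by a decorate-once pass: one precomputed
-- (name, sort-key tuple, output-key) row per named activity, then ordered name dedup + per-name
-- filter/sort over those rows; objective: alternative decomposition, same output and order.

-- Python's `o or dflt` on an optional string (None and "" are falsy)
def pyOrStr (o : Option String) (d : String) : String :=
  match o with
  | some s => if s = "" then d else s
  | none => d

-- `a.get("name") or ""` (used by both programs)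
def actName (a : List (String × String)) : String :=
  pyOrStr ((PySem.Dict.mk a).get? "name") ""

-- module helper `key(a)` (used by both programs)
def pyKey (a : List (String × String)) : String :=
  PySem.Str.join "|"
    [ pyOrStr ((PySem.Dict.mk a).get? "name") ""
    , pyOrStr ((PySem.Dict.mk a).get? "startDate") ""
    , pyOrStr ((PySem.Dict.mk a).get? "endDate") ""
    , pyOrStr ((PySem.Dict.mk a).get? "source") ""
    , pyOrStr ((PySem.Dict.mk a).get? "category") "" ]

-- ===== PORT A =====
def build_period_map (activities : List (List (String × String))) : List (String × Int) :=
  let by_name : PySem.Dict String (List (List (String × String))) :=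
    activities.foldl (fun d a =>
      let n := actName a
      if n = "" then d
      else d.modify n [] (fun l => l ++ [a]))   -- by_name.setdefault(n, []).append(a)
      PySem.Dict.empty
  let out : PySem.Dict String Int :=
    by_name.items.foldl (fun out p =>
      let lst := PySem.List.sorted2 p.2
        (fun x => pyOrStr ((PySem.Dict.mk x).get? "startDate") "9999-99-99")
        (fun x => pyOrStr ((PySem.Dict.mk x).get? "endDate")
                    (pyOrStr ((PySem.Dict.mk x).get? "startDate") "9999-99-99"))
      if lst.length ≤ 1 then out
      else (PySem.List.enumerate lst 1).foldl (fun o q => o.insert (pyKey q.2) q.1) out)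
      PySem.Dict.empty
  out.items

-- ===== PORT B =====
-- B's decorated row for a named activity: (name, (start sort key, end sort key), output key)
def rowOf (a : List (String × String)) : String × (String × String) × String :=
  ( actName a
  , ( pyOrStr ((PySem.Dict.mk a).get? "startDate") "9999-99-99"
    , pyOrStr ((PySem.Dict.mk a).get? "endDate")
        (pyOrStr ((PySem.Dict.mk a).get? "startDate") "9999-99-99") )
  , pyKey a )

def build_period_map_alt (activities : List (List (String × String))) : List (String × Int) :=
  let rows : List (String × (String × String) × String) :=
    activities.foldl (fun rs a => if actName a != "" then rs ++ [rowOf a] else rs) []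
  let out : PySem.Dict String Int :=
    (PySem.List.dedup (rows.map (·.1))).foldl (fun out n =>   -- dict.fromkeys(r[0] for r in rows)
      let grp := PySem.List.sorted2 (rows.filter (fun r => r.1 == n))
        (fun r => r.2.1.1) (fun r => r.2.1.2)                 -- key=lambda r: r[1] (tuple)
      if 1 < grp.length then
        (PySem.List.enumerate grp 1).foldl (fun o q => o.insert q.2.2.2 q.1) out
      else out)
      PySem.Dict.empty
  out.items

-- ===== PRECONDITION & SPEC =====
def Spec_build_period_map (activities : List (List (String × String))) (out : List (String × Int)) : Prop := out = build_period_map_alt activities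
instance (activities : List (List (String × String))) (out : List (String × Int)) : Decidable (Spec_build_period_map activities out) := by unfold Spec_build_period_map; infer_instance

-- ===== CLAIM (what is proved, stated in full; the proofs are below) =====
def Claim_equal_build_period_map : Prop := ∀ (activities : List (List (String × String))), Dom_build_period_map activities → Spec_build_period_map activities (build_period_map activities)

-- ===== LEMMAS AND PROOFS =====

-- the grouping fold of A, restricted to the named activities
def groupFold (named : List (List (String × String))) :
    PySem.Dict String (List (List (String × String))) :=
  named.foldl (fun d a => d.modify (actName a) [] (fun l => l ++ [a])) PySem.Dict.empty

theorem byName_eq_groupFold (activities : List (List (String × String))) :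
    activities.foldl (fun d a =>
      let n := actName a
      if n = "" then d else d.modify n [] (fun l => l ++ [a])) PySem.Dict.empty
    = groupFold (activities.filter (fun a => actName a != "")) := by
  rw [groupFold, List.foldl_filter]
  congr 1
  funext d a
  by_cases h : actName a = "" <;> simp [h]

theorem groupFold_keys (named : List (List (String × String))) :
    (groupFold named).keys = PySem.List.dedup (named.map (fun a => actName a)) := by
  rw [groupFold, PySem.Dict.keys_foldl_modify_key named (fun a => actName a) []
    (fun _ a => fun l => l ++ [a])]
  rfl

theorem groupFold_keys_nodup (named : List (List (String × String))) :
    (groupFold named).keys.Nodup := by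
  rw [groupFold]
  exact PySem.Dict.nodup_keys_foldl_modify_key named (fun a => actName a) []
    (fun _ a => fun l => l ++ [a]) PySem.Dict.empty (by simp)

theorem groupFold_getD (named : List (List (String × String))) (c : String) :
    (groupFold named).getD c [] = named.filter (fun a => actName a == c) := by
  have hmap : groupFold named
      = (named.map (fun a => (actName a, a))).foldl
          (fun d p => d.modify p.1 [] (fun l => l ++ [p.2])) PySem.Dict.empty := by
    rw [groupFold, List.foldl_map]
  rw [hmap, PySem.Dict.getD_foldl_modify_append, List.filter_map, List.map_map]
  simp [Function.comp_def]

-- stability transfer: insertBy through a map whose comparison factors through the map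
theorem insertBy_map {α β : Type} (f : α → β) (bb : β → β → Bool) (ba : α → α → Bool)
    (hc : ∀ a a', bb (f a) (f a') = ba a a') (x : α) (l : List α) :
    PySem.List.insertBy bb (f x) (l.map f) = (PySem.List.insertBy ba x l).map f := by
  induction l with
  | nil => simp [PySem.List.insertBy]
  | cons y ys ih =>
    simp only [List.map_cons, PySem.List.insertBy, hc]
    by_cases h : ba x y = true <;> simp [h, ih]

-- sorting a decorated list by projections = decorating the sorted originals
theorem sorted2_map {α β κ₁ κ₂ : Type} [LinearOrder κ₁] [LinearOrder κ₂]
    (f : α → β) (g1 : β → κ₁) (g2 : β → κ₂) (l : List α) :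
    PySem.List.sorted2 (l.map f) g1 g2
      = (PySem.List.sorted2 l (fun a => g1 (f a)) (fun a => g2 (f a))).map f := by
  simp only [PySem.List.sorted2]
  suffices h : ∀ (acc : List α),
      List.foldl (fun acc x => PySem.List.insertBy
          (fun a b => decide (g1 a < g1 b) || !decide (g1 b < g1 a) && decide (g2 a < g2 b)) x acc)
        (acc.map f) (l.map f)
      = (List.foldl (fun acc x => PySem.List.insertBy
          (fun a b => decide (g1 (f a) < g1 (f b)) || !decide (g1 (f b) < g1 (f a)) && decide (g2 (f a) < g2 (f b))) x acc)
        acc l).map f by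
    exact h []
  induction l with
  | nil => intro acc; simp
  | cons y ys ih =>
    intro acc
    simp only [List.map_cons, List.foldl_cons]
    rw [insertBy_map f _ _ (fun a a' => rfl) y acc]
    exact ih _

-- enumerate of a mapped list
theorem enumerate_map {α β : Type} (f : α → β) (l : List α) (s : Int) :
    PySem.List.enumerate (l.map f) s
      = (PySem.List.enumerate l s).map (fun q => (q.1, f q.2)) := by
  induction l generalizing s with
  | nil => simp [PySem.List.enumerate_nil]
  | cons y ys ih => simp [PySem.List.enumerate_cons, ih]

theorem build_period_map_eq_alt (activities : List (List (String × String))) :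
    build_period_map activities = build_period_map_alt activities := by
  simp only [build_period_map, build_period_map_alt]
  rw [byName_eq_groupFold, PySem.List.foldl_append_if]
  set named := activities.filter (fun a => actName a != "") with hn
  simp only [List.nil_append]
  rw [PySem.Dict.items_eq_map_keys (groupFold named) (groupFold_keys_nodup named) [],
    groupFold_keys, List.foldl_map, List.map_map]
  have hfst : (fun r => r.1) ∘ rowOf = fun a => actName a := rfl
  rw [hfst]
  congr 1
  apply List.foldl_ext
  intro out n _
  dsimp only
  rw [groupFold_getD]
  have hfilter : (named.map rowOf).filter (fun r => r.1 == n)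
      = (named.filter (fun a => actName a == n)).map rowOf := by
    rw [List.filter_map]; rfl
  rw [hfilter, sorted2_map rowOf (fun r => r.2.1.1) (fun r => r.2.1.2)]
  have hA1 : (fun x : List (String × String) =>
      pyOrStr ((PySem.Dict.mk x).get? "startDate") "9999-99-99")
      = (fun a => (rowOf a).2.1.1) := rfl
  have hA2 : (fun x : List (String × String) =>
      pyOrStr ((PySem.Dict.mk x).get? "endDate")
        (pyOrStr ((PySem.Dict.mk x).get? "startDate") "9999-99-99"))
      = (fun a => (rowOf a).2.1.2) := rfl
  have hAi : (fun (o : PySem.Dict String Int) (q : Int × List (String × String)) =>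
      o.insert (pyKey q.2) q.1)
      = (fun o q => o.insert (rowOf q.2).2.2 q.1) := rfl
  rw [hA1, hA2, hAi]
  set g := PySem.List.sorted2 (named.filter (fun a => actName a == n))
    (fun a => (rowOf a).2.1.1) (fun a => (rowOf a).2.1.2) with hg
  rw [List.length_map, enumerate_map, List.foldl_map]
  by_cases h : g.length ≤ 1
  · simp [h]
  · simp [h]

-- ===== VERDICT (by name: the statement is the Claim_ definition above) =====
theorem build_period_map_spec : Claim_equal_build_period_map := by
  intro activities _
  exact build_period_map_eq_alt activities
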